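-- pv_equiv track=rewrite | github.com/SnenS5000/Vilul | Warframe app/warframe_app/services.py | _guess_market_slug
-- ===== SOURCE A (Python) =====
-- def _guess_market_slug(query: str) -> str:
--     text = query.strip().lower().replace("&", " and ").replace("'", "")
--     slug = []
--     previous_was_separator = False
--     for character in text:
--         if character.isalnum():
--             slug.append(character)
--             previous_was_separator = False
--         elif not previous_was_separator:
--             slug.append("_")
--             previous_was_separator = True
--     return "".join(slug).strip("_")
-- ===== SOURCE B (Python) =====
-- from itertools import groupby
--
--
-- def _guess_market_slug(query: str) -> str:
--     text = query.strip().lower().replace("&", " and ").replace("'", "")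
--     return "_".join("".join(group) for key, group in groupby(text, key=str.isalnum) if key)
-- ===== Notes on version B (the rewrite author's own statement) =====
-- stated objective: idiomatic
-- what changed: Replaces the char-by-char loop with a previous-was-separator flag by grouping the text into maximal runs of equal isalnum-key (itertools.groupby) and joining the alphanumeric runs with single underscores, which also makes the trailing strip of underscores unnecessary.
import Mathlib
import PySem

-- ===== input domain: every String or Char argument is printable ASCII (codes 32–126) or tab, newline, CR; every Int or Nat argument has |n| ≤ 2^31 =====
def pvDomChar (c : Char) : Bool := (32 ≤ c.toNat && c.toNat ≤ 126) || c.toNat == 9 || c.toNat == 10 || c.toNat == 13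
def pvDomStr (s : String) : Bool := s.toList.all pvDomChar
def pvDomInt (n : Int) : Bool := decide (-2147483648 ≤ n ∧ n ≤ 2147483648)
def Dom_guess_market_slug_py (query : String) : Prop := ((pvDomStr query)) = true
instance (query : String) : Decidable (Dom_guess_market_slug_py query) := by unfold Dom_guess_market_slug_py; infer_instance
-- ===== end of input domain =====

-- B replaces A's char-by-char loop with a flag by grouping maximal alnum runs (itertools.groupby)
-- and joining them with "_" (idiomatic; same preprocessing, same result).

-- ===== PORT A =====
def guess_market_slug_py (query : String) : String :=
  let text := PySem.Str.replace
      (PySem.Str.replace (PySem.Str.lower (PySem.Str.strip query)) "&" " and ") "'" ""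
  let st := text.toList.foldl
      (fun (st : List Char × Bool) character =>
        if PySem.Chars.isalnum character then (st.1 ++ [character], false)
        else if !st.2 then (st.1 ++ ['_'], true)
        else st)
      ([], false)
  PySem.Str.stripChars (String.ofList st.1) "_"

-- ===== PORT B =====
-- port of itertools.groupby(text, key=str.isalnum): maximal runs of equal isalnum-key
def pyGroupbyAlnum : List Char → List (List Char)
  | [] => []
  | [c] => [[c]]
  | c :: d :: rest =>
    let gs := pyGroupbyAlnum (d :: rest)
    if PySem.Chars.isalnum c == PySem.Chars.isalnum d then
      match gs with
      | g :: gs' => (c :: g) :: gs'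
      | [] => [[c]]
    else [c] :: gs

def guess_market_slug_py_alt (query : String) : String :=
  let text := PySem.Str.replace
      (PySem.Str.replace (PySem.Str.lower (PySem.Str.strip query)) "&" " and ") "'" ""
  PySem.Str.join "_"
    (((pyGroupbyAlnum text.toList).filter
        (fun g => g.head?.any PySem.Chars.isalnum)).map String.ofList)

-- ===== PRECONDITION & SPEC =====
def Spec_guess_market_slug_py (query : String) (out : String) : Prop := out = guess_market_slug_py_alt query
instance (query : String) (out : String) : Decidable (Spec_guess_market_slug_py query out) := by unfold Spec_guess_market_slug_py; infer_instance

-- ===== CLAIM (what is proved, stated in full; the proofs are below) =====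
def Claim_equal_guess_market_slug_py : Prop := ∀ (query : String), Dom_guess_market_slug_py query → Spec_guess_market_slug_py query (guess_market_slug_py query)

-- ===== LEMMAS AND PROOFS =====

-- the slug A's loop builds, as plain structural recursion (acc factored out)
def slugRec : List Char → Bool → List Char
  | [], _ => []
  | c :: cs, p =>
    if PySem.Chars.isalnum c then c :: slugRec cs false
    else if p then slugRec cs true
    else '_' :: slugRec cs true

theorem foldl_eq_slugRec (cs : List Char) (acc : List Char) (p : Bool) :
    (cs.foldl
      (fun (st : List Char × Bool) character =>
        if PySem.Chars.isalnum character then (st.1 ++ [character], false)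
        else if !st.2 then (st.1 ++ ['_'], true)
        else st)
      (acc, p)).1 = acc ++ slugRec cs p := by
  induction cs generalizing acc p with
  | nil => simp [slugRec]
  | cons c cs ih =>
    rw [List.foldl_cons]
    by_cases h : PySem.Chars.isalnum c
    · simpa [slugRec, h] using ih (acc ++ [c]) false
    · cases p
      · simpa [slugRec, h] using ih (acc ++ ['_']) true
      · simpa [slugRec, h] using ih acc true

-- the filtered groups B keeps
def FGroups (cs : List Char) : List (List Char) :=
  (pyGroupbyAlnum cs).filter (fun g => g.head?.any PySem.Chars.isalnum)

def TJoin (cs : List Char) : List Char := PySem.Chars.join ['_'] (FGroups cs)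

theorem join_cons (x : List Char) (xs : List (List Char)) :
    PySem.Chars.join ['_'] (x :: xs)
      = x ++ (match xs with | [] => [] | _ :: _ => '_' :: PySem.Chars.join ['_'] xs) := by
  cases xs with
  | nil => simp [PySem.Chars.join_singleton]
  | cons y ys => simpa using PySem.Chars.join_cons_cons ['_'] x y ys

theorem gb_head (d : Char) (rest : List Char) :
    ∃ g gs, pyGroupbyAlnum (d :: rest) = (d :: g) :: gs := by
  induction rest generalizing d with
  | nil => exact ⟨[], [], rfl⟩
  | cons e r ih =>
    obtain ⟨g, gs, hg⟩ := ih e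
    by_cases h : (PySem.Chars.isalnum d == PySem.Chars.isalnum e) = true
    · exact ⟨e :: g, gs, by simp [pyGroupbyAlnum, h, hg]⟩
    · exact ⟨[], pyGroupbyAlnum (e :: r), by simp [pyGroupbyAlnum, h]⟩

-- every group is nonempty with all elements sharing its head's key
theorem gb_const (cs : List Char) :
    ∀ g ∈ pyGroupbyAlnum cs, ∃ d g', g = d :: g' ∧
      ∀ x ∈ g, PySem.Chars.isalnum x = PySem.Chars.isalnum d := by
  induction cs using pyGroupbyAlnum.induct with
  | case1 => simp [pyGroupbyAlnum]
  | case2 c =>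
    intro g hg
    simp [pyGroupbyAlnum] at hg
    exact ⟨c, [], hg, by simp [hg]⟩
  | case3 c d rest hv h g0 gs0 hgs ih =>
    intro g hg
    have hgs' : pyGroupbyAlnum (d :: rest) = g0 :: gs0 := hgs
    simp only [pyGroupbyAlnum, h, hgs'] at hg
    obtain ⟨g1, gs1, hgb⟩ := gb_head d rest
    rw [hgs'] at hgb
    obtain ⟨hg0, -⟩ := List.cons_eq_cons.mp hgb
    rcases List.mem_cons.1 hg with h1 | h2
    · obtain ⟨d', g', hdg, hall⟩ := ih g0 (by rw [hgs']; simp)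
      have hdmem : d ∈ g0 := by rw [hg0]; simp
      have hcd : PySem.Chars.isalnum c = PySem.Chars.isalnum d := by simpa using h
      subst h1
      refine ⟨c, g0, rfl, ?_⟩
      intro x hx
      rcases List.mem_cons.1 hx with rfl | hx
      · rfl
      · rw [hall x hx, ← hall d hdmem, ← hcd]
    · exact ih g (by rw [hgs']; exact List.mem_cons_of_mem _ h2)
  | case4 c d rest hv h hnil ih =>
    obtain ⟨g1, gs1, hgb⟩ := gb_head d rest
    have hnil' : pyGroupbyAlnum (d :: rest) = [] := hnil
    rw [hnil'] at hgb
    exact absurd hgb.symm (by simp)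
  | case5 c d rest h ih =>
    intro g hg
    simp only [pyGroupbyAlnum, if_neg h] at hg
    rcases List.mem_cons.1 hg with h1 | h2
    · exact ⟨c, [], h1, by simp [h1]⟩
    · exact ih g h2

theorem F_cons_neg (c : Char) (cs : List Char) (h : PySem.Chars.isalnum c = false) :
    FGroups (c :: cs) = FGroups cs := by
  cases cs with
  | nil => simp [FGroups, pyGroupbyAlnum, h]
  | cons d r =>
    obtain ⟨g, gs, hgb⟩ := gb_head d r
    by_cases hd : PySem.Chars.isalnum d
    · have hk : (PySem.Chars.isalnum c == PySem.Chars.isalnum d) = false := by simp [h, hd]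
      simp [FGroups, pyGroupbyAlnum, h, hd]
    · have hk : (PySem.Chars.isalnum c == PySem.Chars.isalnum d) = true := by
        simp [h, Bool.eq_false_iff.2 hd]
      simp only [Bool.not_eq_true] at hd
      simp [FGroups, pyGroupbyAlnum, hgb, h, hd]

theorem F_cons_pos_nil (c : Char) (h : PySem.Chars.isalnum c = true) :
    FGroups [c] = [[c]] := by
  simp [FGroups, pyGroupbyAlnum, h]

theorem F_cons_pos_neg (c d : Char) (r : List Char)
    (hc : PySem.Chars.isalnum c = true) (hd : PySem.Chars.isalnum d = false) :
    FGroups (c :: d :: r) = [c] :: FGroups (d :: r) := by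
  have hk : (PySem.Chars.isalnum c == PySem.Chars.isalnum d) = false := by simp [hc, hd]
  simp [FGroups, pyGroupbyAlnum, hc, hd]

theorem F_cons_pos_pos (c d : Char) (r : List Char)
    (hc : PySem.Chars.isalnum c = true) (hd : PySem.Chars.isalnum d = true) :
    ∃ g gs, FGroups (d :: r) = g :: gs ∧ FGroups (c :: d :: r) = (c :: g) :: gs := by
  obtain ⟨g, gs, hgb⟩ := gb_head d r
  have hk : (PySem.Chars.isalnum c == PySem.Chars.isalnum d) = true := by simp [hc, hd]
  refine ⟨d :: g, gs.filter (fun g => g.head?.any PySem.Chars.isalnum), ?_, ?_⟩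
  · simp [FGroups, hgb, hd]
  · simp [FGroups, pyGroupbyAlnum, hgb, hc, hd]

theorem F_eq_nil_iff (cs : List Char) :
    FGroups cs = [] ↔ cs.any PySem.Chars.isalnum = false := by
  induction cs with
  | nil => simp [FGroups, pyGroupbyAlnum]
  | cons c cs ih =>
    by_cases h : PySem.Chars.isalnum c
    · constructor
      · intro hF
        exfalso
        cases cs with
        | nil => rw [F_cons_pos_nil c h] at hF; simp at hF
        | cons d r =>
          by_cases hd : PySem.Chars.isalnum d
          · obtain ⟨g, gs, _, h2⟩ := F_cons_pos_pos c d r h hd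
            rw [h2] at hF; simp at hF
          · rw [F_cons_pos_neg c d r h (Bool.eq_false_iff.2 hd)] at hF; simp at hF
      · intro hA; simp [h] at hA
    · rw [F_cons_neg c cs (Bool.eq_false_iff.2 h), ih]
      simp [Bool.eq_false_iff.2 h]

-- trailing separator of the raw slug
def trailU (cs : List Char) : List Char :=
  if (cs.any PySem.Chars.isalnum &&
      (match cs.getLast? with | some x => !PySem.Chars.isalnum x | none => false)) = true
  then ['_'] else []

def leadU (cs : List Char) : List Char :=
  match cs with
  | [] => []
  | c :: _ => if PySem.Chars.isalnum c then [] else ['_']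

theorem slugRec_false (cs : List Char) :
    slugRec cs false = leadU cs ++ slugRec cs true := by
  cases cs with
  | nil => rfl
  | cons c cs =>
    by_cases h : PySem.Chars.isalnum c <;> simp [slugRec, leadU, h]

theorem trailU_cons_of_any (c : Char) (cs : List Char)
    (h : cs.any PySem.Chars.isalnum = true) : trailU (c :: cs) = trailU cs := by
  cases cs with
  | nil => simp at h
  | cons d r => simp [trailU, h, List.getLast?_cons_cons]

theorem last_na (cs : List Char) (h : cs.any PySem.Chars.isalnum = false) :
    ∀ x, cs.getLast? = some x → PySem.Chars.isalnum x = false := by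
  intro x hx
  have hmem := List.mem_of_getLast? hx
  simpa using (List.any_eq_false.mp h) x hmem

theorem slugRec_true (cs : List Char) :
    slugRec cs true = TJoin cs ++ trailU cs := by
  induction cs with
  | nil => simp [slugRec, TJoin, FGroups, pyGroupbyAlnum, trailU, PySem.Chars.join_nil]
  | cons c cs ih =>
    by_cases h : PySem.Chars.isalnum c
    · rw [show slugRec (c :: cs) true = c :: slugRec cs false from by simp [slugRec, h]]
      rw [slugRec_false, ih]
      cases cs with
      | nil =>
        simp [leadU, TJoin, FGroups, pyGroupbyAlnum, trailU, h,
          PySem.Chars.join_singleton, PySem.Chars.join_nil]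
      | cons d r =>
        by_cases hd : PySem.Chars.isalnum d
        · obtain ⟨g, gs, h1, h2⟩ := F_cons_pos_pos c d r h hd
          have hA : (d :: r).any PySem.Chars.isalnum = true := by simp [hd]
          rw [trailU_cons_of_any c _ hA]
          simp only [leadU, hd, if_pos, List.nil_append]
          rw [TJoin, TJoin, h1, h2, join_cons, join_cons]
          simp
        · have hd' : PySem.Chars.isalnum d = false := Bool.eq_false_iff.2 hd
          simp only [leadU, hd', Bool.false_eq_true, if_false]
          simp only [TJoin]
          rw [F_cons_pos_neg c d r h hd', join_cons]
          by_cases hA : (d :: r).any PySem.Chars.isalnum = true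
          · obtain ⟨g, gs, hF⟩ : ∃ g gs, FGroups (d :: r) = g :: gs := by
              rcases hFe : FGroups (d :: r) with _ | ⟨g, gs⟩
              · exact absurd ((F_eq_nil_iff _).mp hFe) (by simp [hA])
              · exact ⟨g, gs, rfl⟩
            rw [trailU_cons_of_any c _ hA, hF]
            simp
          · have hA' : (d :: r).any PySem.Chars.isalnum = false := by
              simpa using hA
            have hF : FGroups (d :: r) = [] := (F_eq_nil_iff _).mpr hA'
            have hT : TJoin (d :: r) = [] := by simp [TJoin, hF, PySem.Chars.join_nil]
            have htr : trailU (d :: r) = [] := by simp [trailU, hA']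
            have hlast : ∀ x, (c :: d :: r).getLast? = some x →
                PySem.Chars.isalnum x = false := by
              intro x hx
              rw [List.getLast?_cons_cons] at hx
              exact last_na _ hA' x hx
            have htr2 : trailU (c :: d :: r) = ['_'] := by
              obtain ⟨y, hy⟩ : ∃ y, (c :: d :: r).getLast? = some y := by
                rcases hl : (c :: d :: r).getLast? with _ | y
                · simp at hl
                · exact ⟨y, rfl⟩
              simp [trailU, h, hy, hlast y hy]
            rw [hF, htr, htr2]
            simp [PySem.Chars.join_nil]
    · have h' : PySem.Chars.isalnum c = false := Bool.eq_false_iff.2 h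
      rw [show slugRec (c :: cs) true = slugRec cs true from by simp [slugRec, h'], ih]
      simp only [TJoin]
      rw [F_cons_neg c cs h']
      congr 1
      cases cs with
      | nil => simp [trailU]
      | cons d r =>
        simp [trailU, h', List.getLast?_cons_cons]

theorem F_groups_alnum (cs : List Char) :
    ∀ g ∈ FGroups cs, ∃ d g', g = d :: g' ∧ ∀ y ∈ g, PySem.Chars.isalnum y = true := by
  intro g hg
  obtain ⟨hmem, hpred⟩ := List.mem_filter.mp hg
  obtain ⟨d, g', rfl, hall⟩ := gb_const cs g hmem
  have hd : PySem.Chars.isalnum d = true := by simpa using hpred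
  exact ⟨d, g', rfl, fun y hy => (hall y hy).trans hd⟩

theorem join_ne_nil (g : List Char) (gs : List (List Char)) (hg : g ≠ []) :
    PySem.Chars.join ['_'] (g :: gs) ≠ [] := by
  rw [join_cons]
  cases gs <;> simp [hg]

theorem join_head (rs : List (List Char))
    (h : ∀ g ∈ rs, ∃ d g', g = d :: g' ∧ ∀ y ∈ g, PySem.Chars.isalnum y = true) :
    ∀ x, (PySem.Chars.join ['_'] rs).head? = some x → PySem.Chars.isalnum x = true := by
  intro x hx
  cases rs with
  | nil => simp [PySem.Chars.join_nil] at hx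
  | cons g gs =>
    obtain ⟨d, g', rfl, hall⟩ := h g (by simp)
    rw [join_cons, List.head?_append_of_ne_nil _ (by simp)] at hx
    simp at hx
    rw [← hx]
    exact hall d (by simp)

theorem join_last (rs : List (List Char))
    (h : ∀ g ∈ rs, ∃ d g', g = d :: g' ∧ ∀ y ∈ g, PySem.Chars.isalnum y = true) :
    ∀ x, (PySem.Chars.join ['_'] rs).getLast? = some x → PySem.Chars.isalnum x = true := by
  induction rs with
  | nil => simp [PySem.Chars.join_nil]
  | cons g rs ih =>
    intro x hx
    rw [join_cons] at hx
    cases rs with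
    | nil =>
      simp only [List.append_nil] at hx
      obtain ⟨d, g', rfl, hall⟩ := h g (by simp)
      exact hall x (List.mem_of_getLast? hx)
    | cons r rs' =>
      obtain ⟨d, g', hr, -⟩ := h r (by simp)
      have hne : PySem.Chars.join ['_'] (r :: rs') ≠ [] := by
        rw [hr]; exact join_ne_nil _ _ (by simp)
      obtain ⟨j, J', hJ⟩ := List.exists_cons_of_ne_nil hne
      rw [List.getLast?_append_of_ne_nil _ (by simp)] at hx
      have hx' : (PySem.Chars.join ['_'] (r :: rs')).getLast? = some x := by
        rw [hJ]
        rw [hJ] at hx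
        simpa [List.getLast?_cons_cons] using hx
      exact ih (fun g hg => h g (List.mem_cons_of_mem _ hg)) x hx'

theorem stripChars_pad (M l t : List Char)
    (hl : l = [] ∨ l = ['_']) (ht : t = [] ∨ t = ['_'])
    (hh : ∀ x, M.head? = some x → PySem.Chars.isalnum x = true)
    (hg : ∀ x, M.getLast? = some x → PySem.Chars.isalnum x = true) :
    PySem.Chars.stripChars (l ++ M ++ t) ['_'] = M := by
  cases M with
  | nil => rcases hl with rfl | rfl <;> rcases ht with rfl | rfl <;> decide
  | cons m M' =>
    have hm : PySem.Chars.isalnum m = true := hh m rfl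
    have hmne : m ≠ '_' := by
      intro e; rw [e] at hm; exact absurd hm (by decide)
    have hpm : (['_'] : List Char).contains m = false := by simp [hmne]
    obtain ⟨y, hy⟩ : ∃ y, (m :: M').getLast? = some y := by
      rcases hl' : (m :: M').getLast? with _ | y
      · simp at hl'
      · exact ⟨y, rfl⟩
    have hyal := hg y hy
    have hyne : y ≠ '_' := by
      intro e; rw [e] at hyal; exact absurd hyal (by decide)
    have hpy : (['_'] : List Char).contains y = false := by simp [hyne]
    obtain ⟨R', hR⟩ : ∃ R', (m :: M').reverse = y :: R' := by
      have hrev : (m :: M').reverse.head? = some y := by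
        rw [List.head?_reverse]; exact hy
      rcases hr : (m :: M').reverse with _ | ⟨a, R'⟩
      · rw [hr] at hrev; simp at hrev
      · rw [hr] at hrev; simp at hrev; exact ⟨R', by rw [hrev]⟩
    simp only [PySem.Chars.stripChars]
    have h1 : List.dropWhile (fun c => (['_'] : List Char).contains c)
        (l ++ (m :: M') ++ t) = (m :: M') ++ t := by
      rcases hl with rfl | rfl
      · simp [hmne]
      · simp [hmne]
    rw [h1, List.reverse_append, hR]
    have h2 : List.dropWhile (fun c => (['_'] : List Char).contains c)
        (t.reverse ++ y :: R') = y :: R' := by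
      rcases ht with rfl | rfl
      · simp [hyne]
      · simp [hyne]
    rw [h2, ← hR, List.reverse_reverse]

theorem leadU_cases (cs : List Char) : leadU cs = [] ∨ leadU cs = ['_'] := by
  cases cs with
  | nil => exact Or.inl rfl
  | cons c cs =>
    by_cases h : PySem.Chars.isalnum c <;> simp [leadU, h]

theorem trailU_cases (cs : List Char) : trailU cs = [] ∨ trailU cs = ['_'] := by
  unfold trailU
  by_cases h : (cs.any PySem.Chars.isalnum &&
      (match cs.getLast? with | some x => !PySem.Chars.isalnum x | none => false)) = true
  · rw [if_pos h]; right; rfl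
  · rw [if_neg h]; left; rfl

theorem core_eq (cs : List Char) :
    PySem.Chars.stripChars (slugRec cs false) ['_'] = TJoin cs := by
  rw [slugRec_false, slugRec_true, ← List.append_assoc]
  exact stripChars_pad (TJoin cs) (leadU cs) (trailU cs) (leadU_cases cs) (trailU_cases cs)
    (join_head _ (F_groups_alnum cs)) (join_last _ (F_groups_alnum cs))

-- ===== VERDICT (by name: the statement is the Claim_ definition above) =====
theorem guess_market_slug_py_spec : Claim_equal_guess_market_slug_py := by
  intro query _
  unfold Spec_guess_market_slug_py guess_market_slug_py guess_market_slug_py_alt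
  simp only [PySem.Str.stripChars, PySem.Str.join, String.toList_ofList, List.map_map]
  apply congrArg String.ofList
  rw [foldl_eq_slugRec _ [] false, List.nil_append]
  simp only [Function.comp_def, String.toList_ofList, List.map_id']
  rw [show ("_" : String).toList = ['_'] from by decide]
  exact core_eq _
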